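-- pv_equiv track=rewrite | github.com/sidou06/hackerrank-solutions | Algorithms/Search/KnightL on a Chessboard/Solution.py | knightlOnAChessboard
-- ===== SOURCE A (Python) =====
-- def knightlOnAChessboard(n):
--     res = [[]]
--     # Iterate over all possible knight moves
--     for a in range(1, n):
--         for b in range(1, n):
--             old = [[0, 0]]
--             new = [[0, 0]]
--             cpt = 0
--             # Process the knight's movement until the target is reached
--             while True:
--                 future = []
--                 for pos in new:
--                     i = pos[0]
--                     j = pos[1]
--                     # Check all 8 possible moves for the knight
--                     if i - a >= 0 and j - b >= 0 and [i - a, j - b] not in old: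
--                         future.append([i - a, j - b])
--                         old.append([i - a, j - b])
--                     if i - a >= 0 and j + b < n and [i - a, j + b] not in old:
--                         future.append([i - a, j + b])
--                         old.append([i - a, j + b])
--                     if i + a < n and j - b >= 0 and [i + a, j - b] not in old:
--                         future.append([i + a, j - b])
--                         old.append([i + a, j - b])
--                     if i + a < n and j + b < n and [i + a, j + b] not in old:
--                         future.append([i + a, j + b])
--                         old.append([i + a, j + b])
--                     if i - b >= 0 and j - a >= 0 and [i - b, j - a] not in old:
--                         future.append([i - b, j - a])
--                         old.append([i - b, j - a])
--                     if i - b >= 0 and j + a < n and [i - b, j + a] not in old: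
--                         future.append([i - b, j + a])
--                         old.append([i - b, j + a])
--                     if i + b < n and j - a >= 0 and [i + b, j - a] not in old:
--                         future.append([i + b, j - a])
--                         old.append([i + b, j - a])
--                     if i + b < n and j + a < n and [i + b, j + a] not in old:
--                         future.append([i + b, j + a])
--                         old.append([i + b, j + a])
--                 cpt += 1
--                 # Break if there are no more possible moves
--                 if future == []:
--                     res[a - 1].append(-1)
--                     break
--                 # Check if the target (n-1, n-1) has been reached
--                 if [n - 1, n - 1] in future:
--                     res[a - 1].append(cpt)
--                     break
--                 new = future
--         res.append([])
--
--     # Return the result excluding the last empty list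
--     return res[: -1]
-- ===== SOURCE B (Python) =====
-- def knightlOnAChessboard(n):
--     return [[_moves(n, a, b) for b in range(1, n)] for a in range(1, n)]
--
--
-- def _moves(n, a, b):
--     # Fixpoint computation of the reachable set by whole-board "pull" sweeps:
--     # each round scans every cell of the board and collects the unreached cells
--     # adjacent to the reached set (no frontier/queue); the first round whose
--     # collection contains the target gives the move count, an empty collection
--     # means the reached set is a fixpoint and the target is unreachable.
--     deltas = ((a, b), (a, -b), (-a, b), (-a, -b), (b, a), (b, -a), (-b, a), (-b, -a))
--     reached = {(0, 0)}
--     k = 0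
--     while True:
--         k += 1
--         newly = [(i, j)
--                  for i in range(n) for j in range(n)
--                  if (i, j) not in reached
--                  and any((i + di, j + dj) in reached for di, dj in deltas)]
--         if not newly:
--             return -1
--         if (n - 1, n - 1) in newly:
--             return k
--         reached.update(newly)
-- ===== Notes on version B (the rewrite author's own statement) =====
-- stated objective: alternative
-- what changed: Per (a,b) pair, B computes the set of reachable cells as a fixpoint by whole-board 'pull' sweeps -- each round scans every cell of the board and collects the unreached cells adjacent to the current reached set, counting rounds until the target is pulled in or nothing changes -- instead of A's level-by-level frontier expansion with linear-scan list membership; the result table is built by nested comprehensions instead of A's index-into-res accumulation. Not measurably faster at the tested sizes.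
import Mathlib
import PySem

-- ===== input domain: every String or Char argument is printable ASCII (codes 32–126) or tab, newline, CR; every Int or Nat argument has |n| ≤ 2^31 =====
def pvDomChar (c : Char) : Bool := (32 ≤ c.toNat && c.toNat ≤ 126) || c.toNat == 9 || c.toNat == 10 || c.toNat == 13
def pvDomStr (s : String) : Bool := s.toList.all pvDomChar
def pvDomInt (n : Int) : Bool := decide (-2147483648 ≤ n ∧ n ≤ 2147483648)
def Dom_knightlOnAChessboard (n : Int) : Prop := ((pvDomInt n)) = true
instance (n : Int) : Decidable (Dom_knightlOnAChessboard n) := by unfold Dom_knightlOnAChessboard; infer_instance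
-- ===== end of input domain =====

-- B replaces A's per-pair frontier expansion by a fixpoint computation of the reachable set
-- through whole-board "pull" sweeps; an alternative algorithm, not measured faster.

-- ===== PORT A =====
-- A's repeated "if <bounds> and p not in old: future.append(p); old.append(p)" block.
def tryMoveA (c : Bool) (p : Int × Int) (st : List (Int × Int) × List (Int × Int)) :
    List (Int × Int) × List (Int × Int) :=
  if c && !(st.1.contains p) then (st.1 ++ [p], st.2 ++ [p]) else st

-- one `pos` of A's inner `for pos in new` loop: the 8 explicit `if`s, in A's order
def stepA (n a b : Int) (st : List (Int × Int) × List (Int × Int)) (pos : Int × Int) :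
    List (Int × Int) × List (Int × Int) :=
  let i := pos.1
  let j := pos.2
  let st := tryMoveA (decide (0 ≤ i - a ∧ 0 ≤ j - b)) (i - a, j - b) st
  let st := tryMoveA (decide (0 ≤ i - a ∧ j + b < n)) (i - a, j + b) st
  let st := tryMoveA (decide (i + a < n ∧ 0 ≤ j - b)) (i + a, j - b) st
  let st := tryMoveA (decide (i + a < n ∧ j + b < n)) (i + a, j + b) st
  let st := tryMoveA (decide (0 ≤ i - b ∧ 0 ≤ j - a)) (i - b, j - a) st
  let st := tryMoveA (decide (0 ≤ i - b ∧ j + a < n)) (i - b, j + a) st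
  let st := tryMoveA (decide (i + b < n ∧ 0 ≤ j - a)) (i + b, j - a) st
  tryMoveA (decide (i + b < n ∧ j + a < n)) (i + b, j + a) st

-- A's `while True` loop for one pair (a, b); fuel only makes it total (one unit per
-- iteration; n*n+2 always suffices, since each non-final iteration grows `old`).
def loopA (n a b : Int) : Nat → List (Int × Int) → List (Int × Int) → Int → Int
  | 0, _, _, _ => -1
  | fuel + 1, old, new, cpt =>
    let st := new.foldl (stepA n a b) (old, [])
    let cpt := cpt + 1
    if st.2 = [] then -1
    else if st.2.contains (n - 1, n - 1) then cpt
    else loopA n a b fuel st.1 st.2 cpt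

def knightlOnAChessboard (n : Int) : List (List Int) :=
  let res : List (List Int) := [[]]
  let res := (PySem.List.pyRange 1 n 1).foldl (fun res a =>
      ((PySem.List.pyRange 1 n 1).foldl (fun res b =>
          PySem.List.pySetD res (a - 1)
            (PySem.List.pyGetD res (a - 1) [] ++
              [loopA n a b (n.toNat * n.toNat + 2) [(0, 0)] [(0, 0)] 0])) res)
        ++ [[]]) res
  res.dropLast

-- ===== PORT B =====
def deltasB (a b : Int) : List (Int × Int) :=
  [(a, b), (a, -b), (-a, b), (-a, -b), (b, a), (b, -a), (-b, a), (-b, -a)]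

-- B's round: the list comprehension scanning the whole board for unreached cells
-- adjacent to the reached set
def newlyB (n a b : Int) (reached : PySem.Set (Int × Int)) : List (Int × Int) :=
  (PySem.List.pyRange 0 n 1).flatMap (fun i =>
    ((PySem.List.pyRange 0 n 1).filter (fun j =>
        !(PySem.Set.contains reached (i, j)) &&
        (deltasB a b).any (fun d => PySem.Set.contains reached (i + d.1, j + d.2)))).map
      (fun j => ((i : Int), j)))

-- B's `while True` loop (fuel for totality only, as in loopA)
def loopB (n a b : Int) : Nat → PySem.Set (Int × Int) → Int → Int
  | 0, _, _ => -1
  | fuel + 1, reached, k =>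
    let k := k + 1
    let newly := newlyB n a b reached
    if newly = [] then -1
    else if newly.contains (n - 1, n - 1) then k
    else loopB n a b fuel (PySem.Set.update reached newly) k

def knightlOnAChessboard_alt (n : Int) : List (List Int) :=
  (PySem.List.pyRange 1 n 1).map (fun a =>
    (PySem.List.pyRange 1 n 1).map (fun b =>
      loopB n a b (n.toNat * n.toNat + 2) (PySem.Set.ofList [(0, 0)]) 0))

-- ===== PRECONDITION & SPEC =====
def Spec_knightlOnAChessboard (n : Int) (out : List (List Int)) : Prop := out = knightlOnAChessboard_alt n
instance (n : Int) (out : List (List Int)) : Decidable (Spec_knightlOnAChessboard n out) := by unfold Spec_knightlOnAChessboard; infer_instance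

-- ===== CLAIM (what is proved, stated in full; the proofs are below) =====
def Claim_equal_knightlOnAChessboard : Prop := ∀ (n : Int), Dom_knightlOnAChessboard n → Spec_knightlOnAChessboard n (knightlOnAChessboard n)

-- ===== LEMMAS AND PROOFS =====

def onBoard (n : Int) (p : Int × Int) : Bool :=
  decide (0 ≤ p.1 ∧ p.1 < n ∧ 0 ≤ p.2 ∧ p.2 < n)

-- the 8 cells A tries from `pos`, in A's order
def movesOf (a b : Int) (pos : Int × Int) : List (Int × Int) :=
  [(pos.1 - a, pos.2 - b), (pos.1 - a, pos.2 + b), (pos.1 + a, pos.2 - b), (pos.1 + a, pos.2 + b),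
   (pos.1 - b, pos.2 - a), (pos.1 - b, pos.2 + a), (pos.1 + b, pos.2 - a), (pos.1 + b, pos.2 + a)]

-- A's 8 ifs with their conditions rewritten as full on-board checks
def tryRun (n : Int) (st : List (Int × Int) × List (Int × Int)) (ps : List (Int × Int)) :
    List (Int × Int) × List (Int × Int) :=
  ps.foldl (fun st p => tryMoveA (onBoard n p) p st) st

lemma stepA_eq_tryRun (n a b : Int) (ha : 1 ≤ a) (hb : 1 ≤ b) (pos : Int × Int)
    (hpos : onBoard n pos = true) (st : List (Int × Int) × List (Int × Int)) :
    stepA n a b st pos = tryRun n st (movesOf a b pos) := by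
  simp only [onBoard, decide_eq_true_eq] at hpos
  obtain ⟨h1, h2, h3, h4⟩ := hpos
  have e1 : decide (0 ≤ pos.1 - a ∧ 0 ≤ pos.2 - b) = onBoard n (pos.1 - a, pos.2 - b) := by
    simp only [onBoard]; rw [decide_eq_decide]; omega
  have e2 : decide (0 ≤ pos.1 - a ∧ pos.2 + b < n) = onBoard n (pos.1 - a, pos.2 + b) := by
    simp only [onBoard]; rw [decide_eq_decide]; omega
  have e3 : decide (pos.1 + a < n ∧ 0 ≤ pos.2 - b) = onBoard n (pos.1 + a, pos.2 - b) := by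
    simp only [onBoard]; rw [decide_eq_decide]; omega
  have e4 : decide (pos.1 + a < n ∧ pos.2 + b < n) = onBoard n (pos.1 + a, pos.2 + b) := by
    simp only [onBoard]; rw [decide_eq_decide]; omega
  have e5 : decide (0 ≤ pos.1 - b ∧ 0 ≤ pos.2 - a) = onBoard n (pos.1 - b, pos.2 - a) := by
    simp only [onBoard]; rw [decide_eq_decide]; omega
  have e6 : decide (0 ≤ pos.1 - b ∧ pos.2 + a < n) = onBoard n (pos.1 - b, pos.2 + a) := by
    simp only [onBoard]; rw [decide_eq_decide]; omega
  have e7 : decide (pos.1 + b < n ∧ 0 ≤ pos.2 - a) = onBoard n (pos.1 + b, pos.2 - a) := by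
    simp only [onBoard]; rw [decide_eq_decide]; omega
  have e8 : decide (pos.1 + b < n ∧ pos.2 + a < n) = onBoard n (pos.1 + b, pos.2 + a) := by
    simp only [onBoard]; rw [decide_eq_decide]; omega
  simp only [stepA, tryRun, movesOf, List.foldl_cons, List.foldl_nil, e1, e2, e3, e4, e5, e6, e7, e8]

-- one tryMoveA with a full on-board condition: state shape and membership in `future`
lemma tryMove_char (n : Int) (p : Int × Int) (old₀ fut : List (Int × Int)) :
    (tryMoveA (onBoard n p) p (old₀ ++ fut, fut)).1
      = old₀ ++ (tryMoveA (onBoard n p) p (old₀ ++ fut, fut)).2 ∧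
    ∀ x, x ∈ (tryMoveA (onBoard n p) p (old₀ ++ fut, fut)).2 ↔
      x ∈ fut ∨ (x ∉ old₀ ∧ onBoard n x = true ∧ x = p) := by
  unfold tryMoveA
  by_cases hc : (onBoard n p && !((old₀ ++ fut).contains p)) = true
  · rw [if_pos hc]
    simp only [Bool.and_eq_true, Bool.not_eq_true', List.contains_eq_mem, decide_eq_false_iff_not,
      List.mem_append] at hc
    obtain ⟨hob, hnm⟩ := hc
    refine ⟨by simp, fun x => ?_⟩
    simp only [List.mem_append, List.mem_singleton]
    constructor
    · rintro (hx | rfl)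
      · exact Or.inl hx
      · exact Or.inr ⟨fun h => hnm (Or.inl h), hob, rfl⟩
    · rintro (hx | ⟨-, -, rfl⟩)
      · exact Or.inl hx
      · exact Or.inr rfl
  · rw [if_neg hc]
    simp only [Bool.and_eq_true, Bool.not_eq_true', List.contains_eq_mem, decide_eq_false_iff_not,
      List.mem_append, not_and, not_not] at hc
    refine ⟨rfl, fun x => ?_⟩
    constructor
    · exact Or.inl
    · rintro (hx | ⟨hno, hob, rfl⟩)
      · exact hx
      · rcases hc hob with h | h
        · exact absurd h hno
        · exact h

-- A's per-position fold: state shape and membership in `future`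
lemma tryRun_char (n : Int) :
    ∀ (ps : List (Int × Int)) (old₀ fut : List (Int × Int)),
      (tryRun n (old₀ ++ fut, fut) ps).1 = old₀ ++ (tryRun n (old₀ ++ fut, fut) ps).2 ∧
      ∀ x, x ∈ (tryRun n (old₀ ++ fut, fut) ps).2 ↔
        x ∈ fut ∨ (x ∉ old₀ ∧ onBoard n x = true ∧ x ∈ ps) := by
  intro ps old₀
  induction ps with
  | nil =>
    intro fut
    exact ⟨rfl, fun x => by simp [tryRun]⟩
  | cons p ps ih =>
    intro fut
    obtain ⟨hsh, hmem⟩ := tryMove_char n p old₀ fut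
    have hrun : tryRun n (old₀ ++ fut, fut) (p :: ps) =
        tryRun n (tryMoveA (onBoard n p) p (old₀ ++ fut, fut)) ps := rfl
    have hpair : tryMoveA (onBoard n p) p (old₀ ++ fut, fut) =
        (old₀ ++ (tryMoveA (onBoard n p) p (old₀ ++ fut, fut)).2,
         (tryMoveA (onBoard n p) p (old₀ ++ fut, fut)).2) := by
      rw [← hsh]
    rw [hrun, hpair]
    obtain ⟨ihs, ihm⟩ := ih (tryMoveA (onBoard n p) p (old₀ ++ fut, fut)).2
    refine ⟨ihs, fun x => ?_⟩
    rw [ihm x, hmem x]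
    simp only [List.mem_cons]
    tauto

-- A's whole level: state shape and membership in `future`
lemma levelA_char (n a b : Int) (ha : 1 ≤ a) (hb : 1 ≤ b) :
    ∀ (F : List (Int × Int)) (old₀ fut : List (Int × Int)), (∀ p ∈ F, onBoard n p = true) →
      (F.foldl (stepA n a b) (old₀ ++ fut, fut)).1
        = old₀ ++ (F.foldl (stepA n a b) (old₀ ++ fut, fut)).2 ∧
      ∀ x, x ∈ (F.foldl (stepA n a b) (old₀ ++ fut, fut)).2 ↔
        x ∈ fut ∨ (x ∉ old₀ ∧ onBoard n x = true ∧ ∃ p ∈ F, x ∈ movesOf a b p) := by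
  intro F
  induction F with
  | nil =>
    intro old₀ fut _
    exact ⟨rfl, fun x => by simp⟩
  | cons pos F ih =>
    intro old₀ fut hF
    have hpos : onBoard n pos = true := hF pos (by simp)
    have hstep : (pos :: F).foldl (stepA n a b) (old₀ ++ fut, fut) =
        F.foldl (stepA n a b) (tryRun n (old₀ ++ fut, fut) (movesOf a b pos)) := by
      simp only [List.foldl_cons, stepA_eq_tryRun n a b ha hb pos hpos]
    obtain ⟨hsh, hmem⟩ := tryRun_char n (movesOf a b pos) old₀ fut
    have hpair : tryRun n (old₀ ++ fut, fut) (movesOf a b pos) =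
        (old₀ ++ (tryRun n (old₀ ++ fut, fut) (movesOf a b pos)).2,
         (tryRun n (old₀ ++ fut, fut) (movesOf a b pos)).2) := by
      rw [← hsh]
    rw [hstep, hpair]
    obtain ⟨ihs, ihm⟩ := ih old₀ (tryRun n (old₀ ++ fut, fut) (movesOf a b pos)).2
      (fun p hp => hF p (by simp [hp]))
    refine ⟨ihs, fun x => ?_⟩
    rw [ihm x, hmem x]
    constructor
    · rintro ((hx | ⟨h1, h2, h3⟩) | ⟨h1, h2, p, hp, hx⟩)
      · exact Or.inl hx
      · exact Or.inr ⟨h1, h2, pos, by simp, h3⟩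
      · exact Or.inr ⟨h1, h2, p, by simp [hp], hx⟩
    · rintro (hx | ⟨h1, h2, p, hp, hx⟩)
      · exact Or.inl (Or.inl hx)
      · rcases List.mem_cons.mp hp with rfl | hp
        · exact Or.inl (Or.inr ⟨h1, h2, hx⟩)
        · exact Or.inr ⟨h1, h2, p, hp, hx⟩

-- B's round: membership in `newly`
lemma newlyB_char (n a b : Int) (reached : PySem.Set (Int × Int)) (x : Int × Int) :
    x ∈ newlyB n a b reached ↔
      onBoard n x = true ∧ x ∉ reached ∧ ∃ d ∈ deltasB a b, (x.1 + d.1, x.2 + d.2) ∈ reached := by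
  obtain ⟨x1, x2⟩ := x
  simp only [newlyB, List.mem_flatMap, List.mem_map, List.mem_filter,
    PySem.List.mem_pyRange_one, Bool.and_eq_true, Bool.not_eq_true',
    PySem.Set.contains_eq_listContains, List.contains_eq_mem, decide_eq_false_iff_not,
    List.any_eq_true, decide_eq_true_eq, onBoard, Prod.mk.injEq]
  constructor
  · rintro ⟨i, hi, j, ⟨⟨hj, hnr, d, hd, hmem⟩, rfl, rfl⟩⟩
    exact ⟨by omega, hnr, d, hd, hmem⟩
  · rintro ⟨hob, hnr, d, hd, hmem⟩
    exact ⟨x1, by omega, x2, ⟨⟨by omega, hnr, d, hd, hmem⟩, rfl, rfl⟩⟩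

-- a cell is one of the 8 moves from `pos` iff `pos` is reached back by one of B's deltas
lemma mem_movesOf (a b : Int) (pos x : Int × Int) :
    x ∈ movesOf a b pos ↔ ∃ d ∈ deltasB a b, pos = (x.1 + d.1, x.2 + d.2) := by
  simp only [movesOf, deltasB, List.mem_cons, List.not_mem_nil, or_false]
  constructor
  · rintro (rfl | rfl | rfl | rfl | rfl | rfl | rfl | rfl)
    · exact ⟨(a, b), by simp, by simp⟩
    · exact ⟨(a, -b), by simp, by simp⟩
    · exact ⟨(-a, b), by simp, by simp⟩
    · exact ⟨(-a, -b), by simp, by simp⟩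
    · exact ⟨(b, a), by simp, by simp⟩
    · exact ⟨(b, -a), by simp, by simp⟩
    · exact ⟨(-b, a), by simp, by simp⟩
    · exact ⟨(-b, -a), by simp, by simp⟩
  · rintro ⟨d, (rfl | rfl | rfl | rfl | rfl | rfl | rfl | rfl), rfl⟩ <;>
      simp [Prod.ext_iff]

-- A generates from the frontier, B pulls from the reached set: the two coincide
lemma gen_iff (n a b : Int) (old F : List (Int × Int))
    (hsub : ∀ p ∈ F, p ∈ old)
    (hclosed : ∀ p ∈ old, p ∉ F → ∀ q ∈ movesOf a b p, onBoard n q = true → q ∈ old)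
    (x : Int × Int) (hx : x ∉ old) (hxb : onBoard n x = true) :
    (∃ p ∈ F, x ∈ movesOf a b p) ↔ (∃ d ∈ deltasB a b, (x.1 + d.1, x.2 + d.2) ∈ old) := by
  constructor
  · rintro ⟨p, hp, hmv⟩
    obtain ⟨d, hd, hpeq⟩ := (mem_movesOf a b p x).mp hmv
    exact ⟨d, hd, hpeq ▸ hsub p hp⟩
  · rintro ⟨d, hd, hq⟩
    have hmv : x ∈ movesOf a b (x.1 + d.1, x.2 + d.2) :=
      (mem_movesOf a b _ x).mpr ⟨d, hd, rfl⟩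
    by_cases hqF : (x.1 + d.1, x.2 + d.2) ∈ F
    · exact ⟨_, hqF, hmv⟩
    · exact absurd (hclosed _ hq hqF x hmv hxb) hx

-- the two per-pair loops agree
lemma loop_eq (n a b : Int) (ha : 1 ≤ a) (hb : 1 ≤ b) :
    ∀ (fuel : Nat) (old F : List (Int × Int)) (reached : PySem.Set (Int × Int)) (cpt : Int),
      (∀ x, x ∈ old ↔ x ∈ reached) →
      (∀ p ∈ old, onBoard n p = true) →
      (∀ p ∈ F, p ∈ old) →
      (∀ p ∈ old, p ∉ F → ∀ q ∈ movesOf a b p, onBoard n q = true → q ∈ old) →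
      loopA n a b fuel old F cpt = loopB n a b fuel reached cpt := by
  intro fuel
  induction fuel with
  | zero => intro old F reached cpt _ _ _ _; rfl
  | succ fuel ih =>
    intro old F reached cpt h1 h2 h3 h4
    have hF : ∀ p ∈ F, onBoard n p = true := fun p hp => h2 p (h3 p hp)
    obtain ⟨hsh, hmem⟩ := levelA_char n a b ha hb F old [] hF
    simp only [List.append_nil, List.not_mem_nil, false_or] at hsh hmem
    have key : ∀ x, x ∈ (F.foldl (stepA n a b) (old, [])).2 ↔ x ∈ newlyB n a b reached := by
      intro x
      rw [hmem x, newlyB_char]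
      constructor
      · rintro ⟨hno, hob, hgen⟩
        obtain ⟨d, hd, hq⟩ := (gen_iff n a b old F h3 h4 x hno hob).mp hgen
        exact ⟨hob, fun hr => hno ((h1 x).mpr hr), d, hd, (h1 _).mp hq⟩
      · rintro ⟨hob, hnr, d, hd, hq⟩
        have hno : x ∉ old := fun ho => hnr ((h1 x).mp ho)
        exact ⟨hno, hob, (gen_iff n a b old F h3 h4 x hno hob).mpr ⟨d, hd, (h1 _).mpr hq⟩⟩
    have hempty : (F.foldl (stepA n a b) (old, [])).2 = [] ↔ newlyB n a b reached = [] := by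
      simp only [List.eq_nil_iff_forall_not_mem]
      exact ⟨fun h x hx => h x ((key x).mpr hx), fun h x hx => h x ((key x).mp hx)⟩
    have hcont : (F.foldl (stepA n a b) (old, [])).2.contains (n - 1, n - 1)
        = (newlyB n a b reached).contains (n - 1, n - 1) := by
      simp only [List.contains_eq_mem]
      exact decide_eq_decide.mpr (key _)
    simp only [loopA, loopB]
    by_cases he : (F.foldl (stepA n a b) (old, [])).2 = []
    · rw [if_pos he, if_pos (hempty.mp he)]
    · rw [if_neg he, if_neg (fun h => he (hempty.mpr h)), hcont]
      by_cases hc : (newlyB n a b reached).contains (n - 1, n - 1) = true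
      · rw [if_pos hc, if_pos hc]
      · rw [if_neg hc, if_neg hc]
        apply ih
        · intro x
          rw [hsh]
          simp only [List.mem_append, PySem.Set.mem_update]
          rw [h1 x, key x]
        · intro p hp
          rw [hsh] at hp
          rcases List.mem_append.mp hp with hp | hp
          · exact h2 p hp
          · exact ((hmem p).mp hp).2.1
        · intro p hp
          rw [hsh]
          exact List.mem_append.mpr (Or.inr hp)
        · intro p hp hpn q hq hqob
          rw [hsh] at hp ⊢
          have hpold : p ∈ old := by
            rcases List.mem_append.mp hp with h | h
            · exact h
            · exact absurd h hpn
          by_cases hq1 : q ∈ old ++ (F.foldl (stepA n a b) (old, [])).2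
          · exact hq1
          · exfalso
            have hqno : q ∉ old := fun h => hq1 (List.mem_append.mpr (Or.inl h))
            have hqnf : q ∉ (F.foldl (stepA n a b) (old, [])).2 :=
              fun h => hq1 (List.mem_append.mpr (Or.inr h))
            by_cases hpF : p ∈ F
            · exact hqnf ((hmem q).mpr ⟨hqno, hqob, p, hpF, hq⟩)
            · exact hqno (h4 p hpold hpF q hq hqob)

lemma pair_eq (n a b : Int) (ha : 1 ≤ a) (han : a < n) (hb : 1 ≤ b) :
    loopA n a b (n.toNat * n.toNat + 2) [(0, 0)] [(0, 0)] 0 =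
      loopB n a b (n.toNat * n.toNat + 2) (PySem.Set.ofList [(0, 0)]) 0 := by
  have h : (PySem.Set.ofList [((0 : Int), (0 : Int))]) = [((0 : Int), (0 : Int))] := rfl
  rw [h]
  refine loop_eq n a b ha hb _ _ _ _ _ (fun x => Iff.rfl) ?_ (fun p hp => hp) ?_
  · intro p hp
    simp only [List.mem_singleton] at hp
    subst hp
    simp only [onBoard, decide_eq_true_eq]
    omega
  · intro p hp hnp
    exact absurd hp hnp

-- A's inner `for b` loop only ever appends to res[a-1], the LAST row of res
lemma inner_eq (_n a : Int) (f : Int → Int) (ha : 1 ≤ a) :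
    ∀ (bs : List Int) (rows : List (List Int)) (cur : List Int),
      rows.length = (a - 1).toNat →
      bs.foldl (fun res b =>
          PySem.List.pySetD res (a - 1) (PySem.List.pyGetD res (a - 1) [] ++ [f b]))
        (rows ++ [cur]) = rows ++ [cur ++ bs.map f] := by
  intro bs
  induction bs with
  | nil => intro rows cur _; simp
  | cons b bs ih =>
    intro rows cur hlen
    have h0 : (0 : Int) ≤ a - 1 := by omega
    have hget : PySem.List.pyGetD (rows ++ [cur]) (a - 1) [] = cur := by
      rw [PySem.List.pyGetD_eq_getElem _ _ h0 (by simp [hlen]; omega)]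
      rw [List.getElem_append_right (by simp [hlen])]
      simp [hlen]
    have hset : PySem.List.pySetD (rows ++ [cur]) (a - 1) (cur ++ [f b]) =
        rows ++ [cur ++ [f b]] := by
      rw [PySem.List.pySetD_of_nonneg _ _ h0]
      rw [List.set_append]
      simp [hlen]
    simp only [List.foldl_cons, hget, hset]
    rw [ih rows (cur ++ [f b]) hlen]
    simp

-- A's outer loop builds exactly the rows of the final table, one per a, plus a trailing []
lemma outer_eq (n : Int) (f : Int → Int → Int) :
    ∀ (m : Nat) (k : Int) (rows : List (List Int)),
      (n - k).toNat = m → 1 ≤ k → rows.length = (k - 1).toNat →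
      (PySem.List.pyRange k n 1).foldl (fun res a =>
          ((PySem.List.pyRange 1 n 1).foldl (fun res b =>
              PySem.List.pySetD res (a - 1) (PySem.List.pyGetD res (a - 1) [] ++ [f a b])) res)
            ++ [[]]) (rows ++ [[]]) =
        rows ++ (PySem.List.pyRange k n 1).map
          (fun a => (PySem.List.pyRange 1 n 1).map (f a)) ++ [[]] := by
  intro m
  induction m with
  | zero =>
    intro k rows hm hk _
    have hkn : n ≤ k := by omega
    rw [PySem.List.pyRange_one_eq_nil hkn]
    simp
  | succ m ih =>
    intro k rows hm hk hlen
    have hkn : k < n := by omega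
    rw [PySem.List.pyRange_one_cons hkn]
    simp only [List.foldl_cons, List.map_cons]
    rw [inner_eq n k (f k) hk (PySem.List.pyRange 1 n 1) rows [] hlen]
    have hlen' : (rows ++ [[] ++ (PySem.List.pyRange 1 n 1).map (f k)]).length =
        (k + 1 - 1).toNat := by
      simp [hlen]; omega
    rw [ih (k + 1) _ (by omega) (by omega) hlen']
    simp

-- ===== VERDICT (by name: the statement is the Claim_ definition above) =====
theorem knightlOnAChessboard_spec : Claim_equal_knightlOnAChessboard := by
  intro n _
  show knightlOnAChessboard n = knightlOnAChessboard_alt n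
  simp only [knightlOnAChessboard, knightlOnAChessboard_alt]
  have h := outer_eq n
    (fun a b => loopA n a b (n.toNat * n.toNat + 2) [(0, 0)] [(0, 0)] 0)
    (n - 1).toNat 1 [] rfl (by omega) (by simp)
  simp only [List.nil_append] at h
  rw [h]
  rw [List.dropLast_concat]
  apply List.map_congr_left
  intro a haMem
  apply List.map_congr_left
  intro b hbMem
  rw [PySem.List.mem_pyRange_one] at haMem hbMem
  exact pair_eq n a b haMem.1 haMem.2 hbMem.1
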